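-- pv_equiv track=rewrite | github.com/milkaaig/A2SV-Python-track | 2442-count-number-of-distinct-integers-after-reverse-operations/2442-count-number-of-distinct-integers-after-reverse-operations.py | countDistinctIntegers
-- ===== SOURCE A (Python) =====
-- from typing import List
--
-- def countDistinctIntegers(nums: List[int]) -> int:
--     size = len(nums)
--     for i in range(size):
--         if nums[i] <= 9:
--             pass
--         rev = str(nums[i])[::-1]
--         nums.append(int(rev))
--
--     d = set()
--     distinct = 0
--
--     for i in nums:
--         if i in d:
--             pass
--         else:
--             d.add(i)
--             distinct += 1
--
--     return distinct
-- ===== SOURCE B (Python) =====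
-- from typing import List
--
-- def countDistinctIntegers(nums: List[int]) -> int:
--     # append the digit-reversals of the original elements (same observable mutation as A)
--     nums.extend(int(str(x)[::-1]) for x in list(nums))
--     s = sorted(nums)
--     if not s:
--         return 0
--     distinct = 1
--     prev = s[0]
--     for y in s[1:]:
--         if y != prev:
--             distinct += 1
--         prev = y
--     return distinct
-- ===== Notes on version B (the rewrite author's own statement) =====
-- stated objective: alternative
-- what changed: B appends the reversals by extending with a comprehension over a snapshot of the list, then counts distinct values by sorting a copy and counting adjacent-unequal transitions in one scan, instead of A's index loop plus hash-set membership counting.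
import Mathlib
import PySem

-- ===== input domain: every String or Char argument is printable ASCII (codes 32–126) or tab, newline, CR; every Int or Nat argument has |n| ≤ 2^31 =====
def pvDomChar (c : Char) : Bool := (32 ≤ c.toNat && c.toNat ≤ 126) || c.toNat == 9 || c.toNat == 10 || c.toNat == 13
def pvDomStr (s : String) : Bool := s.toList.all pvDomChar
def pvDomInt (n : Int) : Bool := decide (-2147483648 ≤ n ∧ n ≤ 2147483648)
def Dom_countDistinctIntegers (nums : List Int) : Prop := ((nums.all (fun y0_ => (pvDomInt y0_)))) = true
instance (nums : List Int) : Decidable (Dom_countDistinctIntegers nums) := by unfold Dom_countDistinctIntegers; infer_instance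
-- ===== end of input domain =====

-- B counts the distinct values by sorting a copy and counting adjacent-unequal transitions
-- instead of A's hash-set membership loop; same observable list mutation (both append the
-- reversals of the original elements in order; equivalence proved about the RETURN value).

-- ===== PORT A =====
-- int(str(n)[::-1]); s[::-1] on a string is exactly List.reverse of its chars.
-- Under Pre_ (all elements nonnegative) Python's int() never raises; getD 0 is unreachable there.
def pyRevInt (n : Int) : Int := (PySem.Int.ofChars? (PySem.Int.toChars n).reverse).getD 0

def countDistinctIntegers (nums : List Int) : Int :=
  let size : Int := nums.length
  -- for i in range(size): nums.append(int(str(nums[i])[::-1]))  ('if nums[i] <= 9: pass' is a no-op)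
  let nums1 := (PySem.List.pyRange 0 size 1).foldl
    (fun acc i => acc ++ [pyRevInt (PySem.List.pyGetD acc i 0)]) nums
  -- d = set(); distinct = 0; for i in nums: if i in d: pass else: d.add(i); distinct += 1
  let st := nums1.foldl
    (fun (st : PySem.Set Int × Int) i =>
      if PySem.Set.contains st.1 i then st else (PySem.Set.add st.1 i, st.2 + 1))
    (PySem.Set.empty, 0)
  st.2

-- ===== PORT B =====
-- nums.extend(int(str(x)[::-1]) for x in list(nums))
def countDistinctIntegers_alt (nums : List Int) : Int :=
  let nums1 := nums ++ nums.map pyRevInt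
  let s := PySem.List.sorted nums1 (fun x => x) false
  match s with
  | [] => 0
  | x :: t => (t.foldl (fun (st : Int × Int) y => (y, if y = st.1 then st.2 else st.2 + 1)) (x, 1)).2

-- ===== PRECONDITION & SPEC =====
-- Pre_ excludes lists with a negative element: there int(str(n)[::-1]) raises ValueError
-- (e.g. int('3-')) in A (and in B alike).
def Pre_countDistinctIntegers (nums : List Int) : Prop := ∀ x ∈ nums, 0 ≤ x
instance (nums : List Int) : Decidable (Pre_countDistinctIntegers nums) := by
  unfold Pre_countDistinctIntegers; infer_instance
def pvWitness_countDistinctIntegers : List Int := [12, 5, 120, 21]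

def Spec_countDistinctIntegers (nums : List Int) (out : Int) : Prop := out = countDistinctIntegers_alt nums
instance (nums : List Int) (out : Int) : Decidable (Spec_countDistinctIntegers nums out) := by unfold Spec_countDistinctIntegers; infer_instance

-- ===== CLAIM (what is proved, stated in full; the proofs are below) =====
def Claim_equal_countDistinctIntegers : Prop := ∀ (nums : List Int), Dom_countDistinctIntegers nums → Pre_countDistinctIntegers nums → Spec_countDistinctIntegers nums (countDistinctIntegers nums)

-- ===== LEMMAS AND PROOFS =====

-- A's index loop over the growing list appends exactly the reversals of the original elements.
theorem appendLoop_eq (nums : List Int) (n : Nat) (hn : n ≤ nums.length) :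
    ((List.range n).map (Int.ofNat)).foldl
      (fun acc i => acc ++ [pyRevInt (PySem.List.pyGetD acc i 0)]) nums
      = nums ++ (nums.take n).map pyRevInt := by
  induction n with
  | zero => simp
  | succ k ih =>
    have hk : k ≤ nums.length := Nat.le_of_succ_le hn
    have hget : PySem.List.pyGetD (nums ++ (nums.take k).map pyRevInt) (Int.ofNat k) 0
        = nums[k]'(Nat.lt_of_succ_le hn) := by
      simp only [Int.ofNat_eq_natCast]
      rw [PySem.List.pyGetD_natCast]
      rw [List.getD_eq_getElem?_getD, List.getElem?_append_left (by omega),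
        List.getElem?_eq_getElem (Nat.lt_of_succ_le hn)]
      rfl
    rw [List.range_succ, List.map_append, List.foldl_append, ih hk]
    simp only [List.map_cons, List.map_nil, List.foldl_cons, List.foldl_nil, hget]
    rw [List.append_assoc]
    congr 1
    simp only [List.map_take]
    rw [List.take_add_one, List.getElem?_map, List.getElem?_eq_getElem (Nat.lt_of_succ_le hn)]
    simp

-- A's set loop computes #distinct: counter = c + |Set.update d l| - |d|.
theorem setLoop_eq (l : List Int) (d : PySem.Set Int) (c : Int) :
    (l.foldl
      (fun (st : PySem.Set Int × Int) i =>
        if PySem.Set.contains st.1 i then st else (PySem.Set.add st.1 i, st.2 + 1)) (d, c)).2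
      = c + ((PySem.Set.update d l).length : Int) - (d.length : Int) := by
  induction l generalizing d c with
  | nil => simp [PySem.Set.update]
  | cons x t ih =>
    simp only [List.foldl_cons]
    by_cases h : PySem.Set.contains d x = true
    · have hm : x ∈ d := by simpa [PySem.Set.contains] using h
      have hadd : PySem.Set.add d x = d := by simp [PySem.Set.add, hm]
      rw [if_pos h, ih d c]
      have hupd : PySem.Set.update d (x :: t) = PySem.Set.update d t := by
        simp [PySem.Set.update, hadd]
      rw [hupd]
    · have hm : x ∉ d := by simpa [PySem.Set.contains] using h
      have hadd : PySem.Set.add d x = d ++ [x] := by simp [PySem.Set.add, hm]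
      rw [if_neg h]
      have hupd : PySem.Set.update d (x :: t) = PySem.Set.update (d ++ [x]) t := by
        simp [PySem.Set.update, hadd]
      rw [hadd, ih (d ++ [x]) (c + 1), hupd]
      simp; ring

-- |set(xs)| = xs.toFinset.card
theorem ofList_length_eq_card (xs : List Int) :
    (PySem.Set.ofList xs).length = xs.toFinset.card := by
  have hnd : (PySem.Set.ofList xs).Nodup := PySem.Set.nodup_ofList xs
  have hfs : (PySem.Set.ofList xs).toFinset = xs.toFinset := by
    ext a; simp [List.mem_toFinset, PySem.Set.mem_ofList]
  rw [← List.toFinset_card_of_nodup hnd, hfs]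

-- B's adjacent-unequal scan over a ≤-sorted list counts its distinct values.
theorem scan_eq_card (t : List Int) (x : Int) (c : Int)
    (hs : (x :: t).Pairwise (· ≤ ·)) :
    (t.foldl (fun (st : Int × Int) y => (y, if y = st.1 then st.2 else st.2 + 1)) (x, c)).2
      = c - 1 + ((x :: t).toFinset.card : Int) := by
  induction t generalizing x c with
  | nil => simp
  | cons y t ih =>
    have hst : (y :: t).Pairwise (· ≤ ·) := hs.tail
    by_cases h : y = x
    · subst h
      rw [List.foldl_cons,
        show (y, if y = (y, c).1 then (y, c).2 else (y, c).2 + 1) = ((y, c) : Int × Int) from by simp,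
        ih y c hst]
      congr 2
      simp [List.toFinset_cons]
    · have hxy : x < y := lt_of_le_of_ne (List.rel_of_pairwise_cons hs (by simp)) (Ne.symm h)
      have hnotmem : x ∉ (y :: t).toFinset := by
        simp only [List.mem_toFinset, List.mem_cons]
        rintro (rfl | hm)
        · exact absurd rfl h
        · exact absurd rfl (ne_of_lt (lt_of_lt_of_le hxy
            (List.rel_of_pairwise_cons hst hm))).symm
      rw [List.foldl_cons,
        show (y, if y = (x, c).1 then (x, c).2 else (x, c).2 + 1) = ((y, c + 1) : Int × Int) from by
          simp [h],
        ih y (c + 1) hst]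
      rw [List.toFinset_cons (a := x), Finset.card_insert_of_notMem hnotmem]
      push_cast; ring

-- ===== VERDICT (by name: the statement is the Claim_ definition above) =====
theorem countDistinctIntegers_spec : Claim_equal_countDistinctIntegers := by
  intro nums _ _
  unfold Spec_countDistinctIntegers countDistinctIntegers countDistinctIntegers_alt
  simp only []
  -- first loop of A = B's one-shot append
  have hrange : PySem.List.pyRange 0 (nums.length : Int) 1
      = (List.range nums.length).map (Int.ofNat) := by
    rw [PySem.List.pyRange_one]
    simp [Int.ofNat_eq_natCast]
  have h1 := appendLoop_eq nums nums.length le_rfl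
  rw [hrange] at *
  set nums1 := nums ++ nums.map pyRevInt with hn1
  rw [List.take_length] at h1
  rw [h1]
  -- A's set loop = |toFinset nums1|
  have hA : (nums1.foldl
      (fun (st : PySem.Set Int × Int) i =>
        if PySem.Set.contains st.1 i then st else (PySem.Set.add st.1 i, st.2 + 1))
      (PySem.Set.empty, 0)).2 = (nums1.toFinset.card : Int) := by
    rw [setLoop_eq]
    have : PySem.Set.update PySem.Set.empty nums1 = PySem.Set.ofList nums1 := by
      simp [PySem.Set.update, PySem.Set.ofList_eq_foldl, PySem.Set.empty]
    rw [this, ofList_length_eq_card]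
    simp [PySem.Set.empty]
  rw [hA]
  -- B's scan = |toFinset (sorted nums1)| = |toFinset nums1|
  rcases hsrt : PySem.List.sorted nums1 (fun x => x) false with _ | ⟨x, t⟩
  · have : nums1 = [] := by
      rw [← PySem.List.sorted_eq_nil_iff (key := fun x => x) (rev := false)]; exact hsrt
    simp [this]
  · have hpw : (x :: t).Pairwise (· ≤ ·) := by
      have := PySem.List.sorted_pairwise nums1 (fun x => x)
      rw [hsrt] at this; exact this
    have hperm : (x :: t).Perm nums1 := by
      have := PySem.List.sorted_perm nums1 (fun x => x) false
      rw [hsrt] at this; exact this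
    show (nums1.toFinset.card : Int)
        = (t.foldl (fun (st : Int × Int) y => (y, if y = st.1 then st.2 else st.2 + 1)) (x, 1)).2
    rw [scan_eq_card t x 1 hpw, List.toFinset_eq_of_perm _ _ hperm]
    ring
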